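-- pv_equiv track=rewrite | github.com/vjsingh1984/victor | victor/processing/native/__init__.py | count_circular_patterns
-- ===== SOURCE A (Python) =====
-- _NATIVE_AVAILABLE = False
--
-- _native = None
--
-- _CIRCULAR_PATTERNS = [
--     "let me read",
--     "let me check",
--     "let me look at",
--     "let me examine",
--     "let me see",
--     "i need to read",
--     "i need to check",
--     "i need to look at",
--     "first let me",
--     "now let me",
--     "let me first",
--     "let me start by",
--     "i'll need to",
--     "i will need to",
--     "let me actually use",
--     "let me use the",
--     "i'll actually read",
--     "i'll read",
--     "now i'll",
--     "now i will",
--     "i should read",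
--     "i should examine",
--     "i should check",
--     "let me continue",
--     "let me proceed",
-- ]
--
-- def count_circular_patterns(text: str) -> int:
--     """Count circular patterns in text.
--
--     Args:
--         text: Text to analyze
--
--     Returns:
--         Number of circular pattern matches
--     """
--     if _NATIVE_AVAILABLE:
--         return _native.count_circular_patterns(text)
--
--     # Pure Python fallback
--     text_lower = text.lower()
--     count = 0
--     for pattern in _CIRCULAR_PATTERNS:
--         pos = 0
--         while True:
--             found = text_lower.find(pattern, pos)
--             if found == -1:
--                 break
--             count += 1
--             pos = found + 1
--     return count
-- ===== SOURCE B (Python) =====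
-- _NATIVE_AVAILABLE = False
--
-- _native = None
--
-- _CIRCULAR_PATTERNS = [
--     "let me read",
--     "let me check",
--     "let me look at",
--     "let me examine",
--     "let me see",
--     "i need to read",
--     "i need to check",
--     "i need to look at",
--     "first let me",
--     "now let me",
--     "let me first",
--     "let me start by",
--     "i'll need to",
--     "i will need to",
--     "let me actually use",
--     "let me use the",
--     "i'll actually read",
--     "i'll read",
--     "now i'll",
--     "now i will",
--     "i should read",
--     "i should examine",
--     "i should check",
--     "let me continue",
--     "let me proceed",
-- ]
--
--
-- def count_circular_patterns(text: str) -> int: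
--     """Count circular patterns in text (overlapping starts), single pass.
--
--     Builds a first-character index over the patterns once, then walks the
--     lowercased text left to right, probing only the bucket of patterns that
--     can start at the current character.
--     """
--     if _NATIVE_AVAILABLE:
--         return _native.count_circular_patterns(text)
--
--     buckets = {}
--     for p in _CIRCULAR_PATTERNS:
--         buckets.setdefault(p[0], []).append(p)
--
--     t = text.lower()
--     total = 0
--     for i in range(len(t)):
--         for p in buckets.get(t[i], ()):
--             if t.startswith(p, i):
--                 total += 1
--     return total
-- ===== Notes on version B (the rewrite author's own statement) =====
-- stated objective: alternative
-- what changed: A loops per pattern, rescanning the text with str.find from each match start; B builds a first-character index over the patterns once and makes a single left-to-right pass over the lowercased text, probing only the bucket of patterns that can start at the current character.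
import Mathlib
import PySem

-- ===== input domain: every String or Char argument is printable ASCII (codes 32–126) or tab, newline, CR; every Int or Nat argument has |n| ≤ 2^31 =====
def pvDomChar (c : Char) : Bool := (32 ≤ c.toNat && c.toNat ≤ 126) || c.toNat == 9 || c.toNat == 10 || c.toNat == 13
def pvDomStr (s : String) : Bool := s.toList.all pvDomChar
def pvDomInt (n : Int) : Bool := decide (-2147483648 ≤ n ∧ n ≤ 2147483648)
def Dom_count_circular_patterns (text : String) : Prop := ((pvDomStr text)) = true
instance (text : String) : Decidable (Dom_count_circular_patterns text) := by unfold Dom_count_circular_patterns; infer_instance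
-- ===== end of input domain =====

-- B replaces A's per-pattern rescan of the text (a str.find loop for each pattern) by a single
-- left-to-right pass that probes a first-character index of the patterns; objective: alternative.

-- ===== PORT A =====
-- _CIRCULAR_PATTERNS (shared module constant; both ports iterate it)
def pvPatterns : List (List Char) :=
  (["let me read", "let me check", "let me look at", "let me examine", "let me see",
    "i need to read", "i need to check", "i need to look at", "first let me", "now let me",
    "let me first", "let me start by", "i'll need to", "i will need to", "let me actually use",
    "let me use the", "i'll actually read", "i'll read", "now i'll", "now i will",
    "i should read", "i should examine", "i should check", "let me continue", "let me proceed"]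
      : List String).map String.toList

-- A's inner 'while True: found = text_lower.find(pattern, pos); …; pos = found + 1' loop.
-- The fuel argument only makes the recursion structural: pos strictly increases and stays
-- ≤ len(text), so tl.length + 2 steps always suffice (pvFindLoop_eq below proves this).
def pvFindLoop (tl pat : List Char) : Nat → Nat → Int
  | 0, _ => 0
  | fuel + 1, pos =>
    let found := PySem.Chars.findFrom tl pat (pos : Int)
    if found = -1 then 0 else 1 + pvFindLoop tl pat fuel (found.toNat + 1)

def count_circular_patterns (text : String) : Int :=
  let tl := PySem.Chars.lower text.toList
  pvPatterns.foldl (fun count pat => count + pvFindLoop tl pat (tl.length + 2) 0) 0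

-- ===== PORT B =====
-- buckets = {}; for p in _CIRCULAR_PATTERNS: buckets.setdefault(p[0], []).append(p)
-- (p[0] is p.headI: every pattern is a nonempty literal; setdefault+append = modify with default [])
def pvBuckets : PySem.Dict Char (List (List Char)) :=
  pvPatterns.foldl (fun d p => d.modify p.headI [] (· ++ [p])) PySem.Dict.empty

-- 'for i in range(len(t)): for p in buckets.get(t[i], ()): if t.startswith(p, i): total += 1'
-- ported as recursion over the suffixes of t: at step i the suffix is c :: rest with c = t[i],
-- and t.startswith(p, i) is startswith (c :: rest) p — exact for i = 0 .. len(t)-1.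
def pvScan (bu : PySem.Dict Char (List (List Char))) : List Char → Int
  | [] => 0
  | c :: rest =>
      (bu.getD c []).foldl
        (fun total p => if PySem.Chars.startswith (c :: rest) p then total + 1 else total) 0
      + pvScan bu rest

def count_circular_patterns_alt (text : String) : Int :=
  let t := PySem.Chars.lower text.toList
  pvScan pvBuckets t

-- ===== PRECONDITION & SPEC =====
def Spec_count_circular_patterns (text : String) (out : Int) : Prop := out = count_circular_patterns_alt text
instance (text : String) (out : Int) : Decidable (Spec_count_circular_patterns text out) := by unfold Spec_count_circular_patterns; infer_instance

-- ===== CLAIM (what is proved, stated in full; the proofs are below) =====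
def Claim_equal_count_circular_patterns : Prop := ∀ (text : String), Dom_count_circular_patterns text → Spec_count_circular_patterns text (count_circular_patterns text)

-- ===== LEMMAS AND PROOFS =====

-- the number of occurrence starts of pat in s (overlapping): the count both programs compute per pattern
def pvC (pat s : List Char) : Nat :=
  (List.range s.length).countP (fun j => decide (pat <+: s.drop j))

lemma pvC_nil (pat : List Char) : pvC pat [] = 0 := by
  simp [pvC]

-- one text position: pvC over c :: rest splits into the match at position 0 plus pvC over rest
lemma pvC_cons (pat : List Char) (c : Char) (rest : List Char) :
    pvC pat (c :: rest) = (if pat <+: c :: rest then 1 else 0) + pvC pat rest := by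
  unfold pvC
  rw [List.length_cons, List.range_succ_eq_map, List.countP_cons, List.countP_map]
  rw [List.countP_congr (q := fun j => decide (pat <+: rest.drop j)) (fun x _ => by simp)]
  by_cases h : pat <+: c :: rest <;> simp [h, Nat.add_comm]

-- a first match at offset m contributes 1 and the remaining matches start at m+1 or later
lemma pvC_first_match (pat s : List Char) (m : Nat) (hne : pat ≠ [])
    (hm : pat <+: s.drop m) (hmin : ∀ i < m, ¬ pat <+: s.drop i) :
    pvC pat s = 1 + pvC pat (s.drop (m + 1)) := by
  have hplen : 1 ≤ pat.length := by cases pat <;> simp_all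
  have hmlt : m < s.length := by
    have := hm.length_le
    simp [List.length_drop] at this
    omega
  have hsplit : s.length = (m + 1) + (s.length - (m + 1)) := by omega
  unfold pvC
  rw [hsplit, List.range_add, List.countP_append, List.range_succ, List.countP_append,
    List.countP_map]
  have h1 : (List.range m).countP (fun j => decide (pat <+: s.drop j)) = 0 := by
    rw [List.countP_eq_zero]
    intro j hj
    simp only [List.mem_range] at hj
    simp [hmin j hj]
  have h2 : (List.countP (fun j => decide (pat <+: s.drop j)) [m]) = 1 := by
    simp [hm]
  rw [h1, h2]
  have h3 : ∀ j, ((fun j => decide (pat <+: s.drop j)) ∘ (fun x => m + 1 + x)) j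
      = (fun j => decide (pat <+: (s.drop (m+1)).drop j)) j := by
    intro j; simp [List.drop_drop, Nat.add_comm]
  rw [List.countP_congr (fun x _ => by rw [h3 x])]
  simp [List.length_drop]

-- A's find loop computes pvC on the remaining text, given enough fuel
lemma pvFindLoop_eq (tl pat : List Char) (hne : pat ≠ []) :
    ∀ fuel pos, pos ≤ tl.length → tl.length + 1 - pos ≤ fuel →
      pvFindLoop tl pat fuel pos = (pvC pat (tl.drop pos) : Int) := by
  intro fuel
  induction fuel with
  | zero => intro pos h1 h2; omega
  | succ fuel ih =>
    intro pos h1 h2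
    rw [pvFindLoop]
    simp only [PySem.Chars.findFrom_natCast tl pat pos h1]
    set g := PySem.Chars.find (tl.drop pos) pat with hg
    by_cases hneg : g = -1
    · simp only [hneg, reduceIte]
      have hinf : ¬ pat <:+: tl.drop pos := (PySem.Chars.find_eq_neg_one_iff _ _).mp hneg
      have : pvC pat (tl.drop pos) = 0 := by
        rw [pvC, List.countP_eq_zero]
        intro j hj
        simp only [decide_eq_true_eq]
        intro hpre
        exact hinf (hpre.isInfix.trans (List.drop_suffix j _).isInfix)
      simp [this]
    · have hg0 : 0 ≤ g := by have := PySem.Chars.neg_one_le_find (tl.drop pos) pat; omega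
      have hspec := PySem.Chars.find_spec (s := tl.drop pos) (sub := pat) hg0
      obtain ⟨hpre, hmin⟩ := hspec
      rw [if_neg (by omega), if_neg (by simpa [hg] using hneg)]
      have hplen : 1 ≤ pat.length := by cases pat <;> simp_all
      have hdl : (tl.drop pos).length = tl.length - pos := List.length_drop
      have hlen : pat.length ≤ (tl.drop pos).length - g.toNat := by
        have := hpre.length_le; simp [List.length_drop] at this; omega
      have hglt : g.toNat < (tl.drop pos).length := by omega
      have hfound : ((pos : Int) + g).toNat = pos + g.toNat := by omega
      rw [hfound]
      have hpos' : pos + g.toNat + 1 ≤ tl.length := by omega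
      rw [ih (pos + g.toNat + 1) hpos' (by omega)]
      have := pvC_first_match pat (tl.drop pos) g.toNat hne hpre hmin
      rw [List.drop_drop] at this
      rw [this, Nat.add_assoc]
      push_cast
      ring

lemma pvPatterns_ne_nil : ∀ p ∈ pvPatterns, p ≠ [] := by decide

-- the first-character index is exactly the pattern list filtered by head character
lemma pvBuckets_getD (c : Char) :
    pvBuckets.getD c [] = pvPatterns.filter (fun p => p.headI == c) := by
  have h : pvBuckets
      = (pvPatterns.map (fun p => (p.headI, p))).foldl
          (fun d q => d.modify q.1 [] (· ++ [q.2])) PySem.Dict.empty := by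
    rw [List.foldl_map]
    rfl
  rw [h, PySem.Dict.getD_foldl_modify_append]
  rw [List.filter_map, List.map_map]
  simp [Function.comp_def]

-- probing only the bucket of c loses no match: a match starting with c starts with c
lemma pvBucket_countP (c : Char) (rest : List Char) :
    (pvBuckets.getD c []).countP (fun p => decide (p <+: c :: rest))
      = pvPatterns.countP (fun p => decide (p <+: c :: rest)) := by
  rw [pvBuckets_getD, List.countP_filter]
  refine List.countP_congr ?_
  intro p hp
  simp only [Bool.and_eq_true, decide_eq_true_eq, beq_iff_eq]
  constructor
  · rintro ⟨h1, _⟩; exact h1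
  · intro h1
    refine ⟨h1, ?_⟩
    obtain ⟨a, tp, rfl⟩ : ∃ a tp, p = a :: tp := by
      cases p with
      | nil => exact absurd rfl (pvPatterns_ne_nil _ hp)
      | cons a tp => exact ⟨a, tp, rfl⟩
    rw [List.cons_prefix_cons] at h1
    simpa using h1.1

-- B's scan equals the per-pattern sum of pvC (the loop order swap)
lemma pvScan_eq (t : List Char) :
    pvScan pvBuckets t = (pvPatterns.map (fun pat => (pvC pat t : Int))).sum := by
  induction t with
  | nil => simp [pvScan, pvC_nil]
  | cons c rest ih =>
    rw [pvScan, ih, PySem.List.foldl_count_if]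
    have hsw : (pvBuckets.getD c []).countP (fun p => PySem.Chars.startswith (c :: rest) p)
        = (pvBuckets.getD c []).countP (fun p => decide (p <+: c :: rest)) := by
      refine List.countP_congr ?_
      intro p _
      simp [PySem.Chars.startswith_iff]
    rw [hsw, pvBucket_countP]
    have hmap : (pvPatterns.map (fun pat => (pvC pat (c :: rest) : Int)))
        = pvPatterns.map (fun pat =>
            (if decide (pat <+: c :: rest) = true then (1 : Int) else 0) + (pvC pat rest : Int)) := by
      refine List.map_congr_left ?_
      intro pat _
      rw [pvC_cons]
      by_cases h : pat <+: c :: rest <;> simp [h]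
    rw [hmap, PySem.List.sum_map_add_int, PySem.List.sum_map_ite_one_zero]
    ring

-- ===== VERDICT (by name: the statement is the Claim_ definition above) =====
theorem count_circular_patterns_spec : Claim_equal_count_circular_patterns := by
  intro text _
  unfold Spec_count_circular_patterns count_circular_patterns count_circular_patterns_alt
  rw [PySem.List.foldl_add, pvScan_eq]
  have h : ∀ pat ∈ pvPatterns,
      pvFindLoop (PySem.Chars.lower text.toList) pat ((PySem.Chars.lower text.toList).length + 2) 0
        = (pvC pat (PySem.Chars.lower text.toList) : Int) := by
    intro pat hp
    simpa using pvFindLoop_eq (PySem.Chars.lower text.toList) pat (pvPatterns_ne_nil pat hp)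
      ((PySem.Chars.lower text.toList).length + 2) 0 (Nat.zero_le _) (by omega)
  rw [List.map_congr_left h]
  simp
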